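-- pv_equiv track=rewrite | github.com/pfahlr/rag_writer | run_rag_verification.py | summary_counts
-- ===== SOURCE A (Python) =====
-- def summary_counts(records: list[dict]) -> dict[str, int]:
--     total = len(records)
--     graded = sum(1 for rec in records if rec.get("pass") is not None)
--     passed = sum(1 for rec in records if rec.get("pass") is True)
--     failed = sum(1 for rec in records if rec.get("pass") is False)
--     skipped = total - graded
--     return {
--         "total": total,
--         "graded": graded,
--         "passed": passed,
--         "failed": failed,
--         "skipped": skipped,
--     }
-- ===== SOURCE B (Python) =====
-- def summary_counts(records: list[dict]) -> dict[str, int]: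
--     graded = passed = failed = 0
--     for rec in records:
--         p = rec.get("pass")
--         if p is not None:
--             graded += 1
--         if p is True:
--             passed += 1
--         elif p is False:
--             failed += 1
--     total = len(records)
--     return {
--         "total": total,
--         "graded": graded,
--         "passed": passed,
--         "failed": failed,
--         "skipped": total - graded,
--     }
-- ===== Notes on version B (the rewrite author's own statement) =====
-- stated objective: simpler
-- what changed: Replaced the three independent generator-sum passes over records with a single loop maintaining graded/passed/failed counters (skipped = total - graded).
import Mathlib
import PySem

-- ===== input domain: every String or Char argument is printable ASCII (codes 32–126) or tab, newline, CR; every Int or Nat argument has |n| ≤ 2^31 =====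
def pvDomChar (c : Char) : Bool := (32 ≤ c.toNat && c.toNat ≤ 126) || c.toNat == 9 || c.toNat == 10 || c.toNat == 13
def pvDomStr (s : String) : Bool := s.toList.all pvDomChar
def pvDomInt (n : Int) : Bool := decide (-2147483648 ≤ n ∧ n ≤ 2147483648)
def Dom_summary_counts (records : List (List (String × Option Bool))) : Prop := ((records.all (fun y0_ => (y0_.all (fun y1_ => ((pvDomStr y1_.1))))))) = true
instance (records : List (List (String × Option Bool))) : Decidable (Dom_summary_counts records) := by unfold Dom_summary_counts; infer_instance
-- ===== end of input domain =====

-- B replaces A's three separate counting passes by a single loop carrying three counters; objective: simpler.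

-- ===== PORT A =====
-- rec.get("pass") : missing key and explicit None both give None
def pvGetPass (rec : List (String × Option Bool)) : Option Bool :=
  PySem.Dict.getD (PySem.Dict.mk rec) "pass" none

def summary_counts (records : List (List (String × Option Bool))) : List (String × Int) :=
  let total : Int := records.length
  let graded : Int := (records.countP (fun rec => pvGetPass rec ≠ none)) -- sum(1 for … if … is not None)
  let passed : Int := (records.countP (fun rec => pvGetPass rec = some true))
  let failed : Int := (records.countP (fun rec => pvGetPass rec = some false))
  let skipped : Int := total - graded
  [("total", total), ("graded", graded), ("passed", passed), ("failed", failed), ("skipped", skipped)]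

-- ===== PORT B =====
def summary_counts_alt (records : List (List (String × Option Bool))) : List (String × Int) :=
  let st : Int × Int × Int := records.foldl
    (fun (st : Int × Int × Int) rec =>
      let p := pvGetPass rec
      let g := if p ≠ none then st.1 + 1 else st.1
      let pa := if p = some true then st.2.1 + 1 else st.2.1
      let fa := if p = some false then st.2.2 + 1 else st.2.2  -- elif: cannot coincide with p = some true
      (g, pa, fa)) (0, 0, 0)
  let total : Int := records.length
  [("total", total), ("graded", st.1), ("passed", st.2.1), ("failed", st.2.2),
   ("skipped", total - st.1)]

-- ===== PRECONDITION & SPEC =====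
def Spec_summary_counts (records : List (List (String × Option Bool))) (out : List (String × Int)) : Prop := out = summary_counts_alt records
instance (records : List (List (String × Option Bool))) (out : List (String × Int)) : Decidable (Spec_summary_counts records out) := by unfold Spec_summary_counts; infer_instance

-- ===== CLAIM (what is proved, stated in full; the proofs are below) =====
def Claim_equal_summary_counts : Prop := ∀ (records : List (List (String × Option Bool))), Dom_summary_counts records → Spec_summary_counts records (summary_counts records)

-- ===== LEMMAS AND PROOFS =====
theorem summary_fold (records : List (List (String × Option Bool)))
    (g p f : Int) :
    records.foldl
      (fun (st : Int × Int × Int) rec =>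
        let pv := pvGetPass rec
        let g := if pv ≠ none then st.1 + 1 else st.1
        let pa := if pv = some true then st.2.1 + 1 else st.2.1
        let fa := if pv = some false then st.2.2 + 1 else st.2.2
        (g, pa, fa)) (g, p, f)
    = (g + records.countP (fun rec => pvGetPass rec ≠ none),
       p + records.countP (fun rec => pvGetPass rec = some true),
       f + records.countP (fun rec => pvGetPass rec = some false)) := by
  induction records generalizing g p f with
  | nil => simp
  | cons r rs ih =>
    simp only [List.foldl_cons, List.countP_cons, ih]
    rcases h : pvGetPass r with _ | b
    case cons.none => simp [h]
    all_goals cases b <;> simp [h] <;> refine ⟨by omega, by omega⟩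

-- ===== VERDICT (by name: the statement is the Claim_ definition above) =====
theorem summary_counts_spec : Claim_equal_summary_counts := by
  intro records _
  show _ = _
  simp only [summary_counts, summary_counts_alt, summary_fold]
  norm_num
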